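-- pv_equiv track=rewrite | github.com/Project12x/ARDK | tools/pipeline/cross_platform.py | _optimize_tiles
-- ===== SOURCE A (Python) =====
-- from typing import List, Dict, Optional, Tuple, Any, Union
--
-- def _optimize_tiles(
--
--     tiles: List[List[int]],
-- ) -> Tuple[List[List[int]], List[int]]:
--     """Remove duplicate tiles and build tile map.
--
--     Args:
--         tiles: List of tile data.
--
--     Returns:
--         Tuple of (unique tiles, tile map indices).
--     """
--     unique = []
--     tile_map = []
--     seen: Dict[tuple, int] = {}
--
--     for tile in tiles:
--         key = tuple(tile)
--         if key in seen:
--             tile_map.append(seen[key])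
--         else:
--             idx = len(unique)
--             seen[key] = idx
--             unique.append(tile)
--             tile_map.append(idx)
--
--     return unique, tile_map
-- ===== SOURCE B (Python) =====
-- from typing import List, Tuple
--
-- def _optimize_tiles(
--     tiles: List[List[int]],
-- ) -> Tuple[List[List[int]], List[int]]:
--     """Remove duplicate tiles and build tile map (dict-free version).
--
--     unique keeps the first occurrence of every tile in order; each map entry
--     is the position of the tile's first occurrence, found by list search.
--     """
--     unique: List[List[int]] = []
--     for tile in tiles:
--         if tile not in unique:
--             unique.append(tile)
--     tile_map = [unique.index(tile) for tile in tiles]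
--     return unique, tile_map
-- ===== Notes on version B (the rewrite author's own statement) =====
-- stated objective: alternative
-- what changed: B drops the hash table entirely: it dedups by list membership on the unique list itself and computes each map entry as unique.index(tile), i.e. the position of the tile's first occurrence, trading A's dict index for quadratic list search.
import Mathlib
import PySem

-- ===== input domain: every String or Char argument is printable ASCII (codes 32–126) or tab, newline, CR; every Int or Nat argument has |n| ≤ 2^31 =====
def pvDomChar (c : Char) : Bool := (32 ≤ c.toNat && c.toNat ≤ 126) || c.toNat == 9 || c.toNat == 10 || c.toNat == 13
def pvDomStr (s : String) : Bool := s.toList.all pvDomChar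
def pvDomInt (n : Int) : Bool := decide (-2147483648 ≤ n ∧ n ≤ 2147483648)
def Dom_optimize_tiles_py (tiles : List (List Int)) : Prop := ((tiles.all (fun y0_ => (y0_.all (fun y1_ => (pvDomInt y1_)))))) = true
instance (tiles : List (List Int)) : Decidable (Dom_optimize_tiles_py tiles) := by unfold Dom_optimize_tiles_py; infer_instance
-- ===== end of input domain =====

-- B replaces A's hash-table dedup by a dict-free version: dedup by list membership,
-- and each map entry is the index of the tile's first occurrence (list search).

-- ===== PORT A =====
-- single loop carrying (unique, tile_map, seen); 'seen[key]' is a lookup of a key that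
-- is present whenever read, ported as getD _ 0 (the default is never used)
def optimize_tiles_py (tiles : List (List Int)) : List (List Int) × List Int :=
  let st := tiles.foldl
    (fun (st : List (List Int) × List Int × PySem.Dict (List Int) Int) tile =>
      let unique := st.1
      let tile_map := st.2.1
      let seen := st.2.2
      if seen.contains tile then
        (unique, tile_map ++ [seen.getD tile 0], seen)
      else
        let idx : Int := unique.length
        (unique ++ [tile], tile_map ++ [idx], seen.insert tile idx))
    ([], [], PySem.Dict.empty)
  (st.1, st.2.1)

-- ===== PORT B =====
-- loop: 'if tile not in unique: unique.append(tile)'; then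
-- 'tile_map = [unique.index(tile) for tile in tiles]' — index always succeeds, getD 0 unused
def optimize_tiles_py_alt (tiles : List (List Int)) : List (List Int) × List Int :=
  let unique := tiles.foldl
    (fun (u : List (List Int)) tile => if u.contains tile then u else u ++ [tile]) []
  (unique, tiles.map (fun tile => (((PySem.List.index? unique tile).getD 0 : Nat) : Int)))

-- ===== PRECONDITION & SPEC =====
def Spec_optimize_tiles_py (tiles : List (List Int)) (out : List (List Int) × List Int) : Prop := out = optimize_tiles_py_alt tiles
instance (tiles : List (List Int)) (out : List (List Int) × List Int) : Decidable (Spec_optimize_tiles_py tiles out) := by unfold Spec_optimize_tiles_py; infer_instance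

-- ===== CLAIM =====
def Claim_equal_optimize_tiles_py : Prop := ∀ (tiles : List (List Int)), Dom_optimize_tiles_py tiles → Spec_optimize_tiles_py tiles (optimize_tiles_py tiles)

-- ===== LEMMAS AND PROOFS =====

-- proof-side abbreviations for the two loop bodies
def pvStepA (st : List (List Int) × List Int × PySem.Dict (List Int) Int) (tile : List Int) :
    List (List Int) × List Int × PySem.Dict (List Int) Int :=
  if st.2.2.contains tile then
    (st.1, st.2.1 ++ [st.2.2.getD tile 0], st.2.2)
  else
    (st.1 ++ [tile], st.2.1 ++ [(st.1.length : Int)], st.2.2.insert tile (st.1.length : Int))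

def pvStepB (u : List (List Int)) (tile : List Int) : List (List Int) :=
  if u.contains tile then u else u ++ [tile]

-- B's dedup loop only appends
lemma pvDedup_extends (tiles : List (List Int)) :
    ∀ u : List (List Int), ∃ ext, tiles.foldl pvStepB u = u ++ ext := by
  induction tiles with
  | nil => intro u; exact ⟨[], by simp⟩
  | cons t rest ih =>
    intro u
    simp only [List.foldl_cons]
    by_cases hc : t ∈ u
    · have h : pvStepB u t = u := by unfold pvStepB; simp [hc]
      rw [h]; exact ih u
    · have h : pvStepB u t = u ++ [t] := by unfold pvStepB; simp [hc]
      rw [h]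
      obtain ⟨ext, he⟩ := ih (u ++ [t])
      exact ⟨t :: ext, by rw [he]; simp⟩

-- a first-occurrence index already fixed survives the rest of the dedup loop
lemma pvIndex_preserved (tiles : List (List Int)) (u : List (List Int)) (k : List Int)
    (hk : k ∈ u) : PySem.List.index? (tiles.foldl pvStepB u) k = PySem.List.index? u k := by
  obtain ⟨ext, he⟩ := pvDedup_extends tiles u
  rw [he, PySem.List.index?_append_of_mem ext hk]

-- A's combined loop in terms of B's dedup list, given the dict agrees with index?
lemma pvLoop_eq (tiles : List (List Int)) :
    ∀ (u : List (List Int)) (m : List Int) (s : PySem.Dict (List Int) Int),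
      (∀ k, s.get? k = (PySem.List.index? u k).map (fun n : Nat => (n : Int))) →
      tiles.foldl pvStepA (u, m, s) =
        (tiles.foldl pvStepB u,
         m ++ tiles.map (fun t =>
           (((PySem.List.index? (tiles.foldl pvStepB u) t).getD 0 : Nat) : Int)),
         (tiles.foldl pvStepA (u, m, s)).2.2) := by
  induction tiles with
  | nil => intro u m s _; simp
  | cons t rest ih =>
    intro u m s hs
    simp only [List.foldl_cons, List.map_cons]
    by_cases hc : t ∈ u
    · -- t already seen: s contains it, index fixed
      obtain ⟨j, hj⟩ := Option.isSome_iff_exists.mp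
        ((PySem.List.index?_isSome_iff u t).mpr hc)
      have hget : s.get? t = some (j : Int) := by rw [hs t, hj]; rfl
      have hsc : s.contains t = true := by
        rw [PySem.Dict.contains_eq_isSome_get?, hget]; rfl
      have hBc : u.contains t = true := by simpa using hc
      have hsA : pvStepA (u, m, s) t = (u, m ++ [s.getD t 0], s) := by
        unfold pvStepA; simp [hsc]
      have hsB : pvStepB u t = u := by unfold pvStepB; simp [hc]
      rw [hsA, hsB, ih u (m ++ [s.getD t 0]) s hs]
      have hfin : PySem.List.index? (rest.foldl pvStepB u) t = some j := by
        rw [pvIndex_preserved rest u t hc, hj]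
      have hval : s.getD t 0
          = (((PySem.List.index? (rest.foldl pvStepB u) t).getD 0 : Nat) : Int) := by
        rw [PySem.Dict.getD_eq_get?_getD, hget, hfin]; rfl
      rw [hval]; simp
    · -- t fresh: appended at position u.length
      have hget : s.get? t = none := by
        rw [hs t, (PySem.List.index?_eq_none_iff u t).mpr hc]; rfl
      have hsc : s.contains t = false := by
        rw [PySem.Dict.contains_eq_isSome_get?, hget]; rfl
      have hBc : u.contains t = false := by simpa using hc
      have hsA : pvStepA (u, m, s) t
          = (u ++ [t], m ++ [(u.length : Int)], s.insert t (u.length : Int)) := by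
        unfold pvStepA; simp [hsc]
      have hsB : pvStepB u t = u ++ [t] := by unfold pvStepB; simp [hc]
      have hidx : PySem.List.index? (u ++ [t]) t = some u.length :=
        PySem.List.index?_append_singleton_self u t hc
      have hs' : ∀ k, (s.insert t (u.length : Int)).get? k
          = (PySem.List.index? (u ++ [t]) k).map (fun n : Nat => (n : Int)) := by
        intro k
        by_cases hk : k = t
        · subst hk
          rw [PySem.Dict.get?_insert_self, hidx]; rfl
        · rw [PySem.Dict.get?_insert_of_ne _ _ hk, hs k]
          by_cases hku : k ∈ u
          · rw [PySem.List.index?_append_of_mem [t] hku]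
          · rw [(PySem.List.index?_eq_none_iff u k).mpr hku,
              (PySem.List.index?_eq_none_iff (u ++ [t]) k).mpr (by simp [hku, hk])]
      rw [hsA, hsB, ih (u ++ [t]) (m ++ [(u.length : Int)]) _ hs']
      have hfin : PySem.List.index? (rest.foldl pvStepB (u ++ [t])) t = some u.length := by
        rw [pvIndex_preserved rest (u ++ [t]) t (by simp), hidx]
      rw [hfin]; simp

-- ===== VERDICT =====
theorem optimize_tiles_py_spec : Claim_equal_optimize_tiles_py := by
  intro tiles _
  unfold Spec_optimize_tiles_py optimize_tiles_py optimize_tiles_py_alt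
  have hA : (fun (st : List (List Int) × List Int × PySem.Dict (List Int) Int) tile =>
      let unique := st.1
      let tile_map := st.2.1
      let seen := st.2.2
      if seen.contains tile then
        (unique, tile_map ++ [seen.getD tile 0], seen)
      else
        let idx : Int := unique.length
        (unique ++ [tile], tile_map ++ [idx], seen.insert tile idx)) = pvStepA := by
    funext st tile; unfold pvStepA; rfl
  have hB : (fun (u : List (List Int)) tile =>
      if u.contains tile then u else u ++ [tile]) = pvStepB := by
    funext u tile; unfold pvStepB; rfl
  have hinv : ∀ k, (PySem.Dict.empty : PySem.Dict (List Int) Int).get? k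
      = (PySem.List.index? ([] : List (List Int)) k).map (fun n : Nat => (n : Int)) := by
    intro k; simp [PySem.Dict.get?, PySem.Dict.empty, PySem.List.index?]
  simp only [hA, hB]
  rw [pvLoop_eq tiles [] [] PySem.Dict.empty hinv]
  simp
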